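-- pv_equiv track=rewrite | github.com/ongmk/FPL | src/fpl/pipelines/optimization/chips_suggestion.py | get_candidate_weeks
-- ===== SOURCE A (Python) =====
-- def get_excluded_weeks(chips_usage, gap):
--     excluded = set()
--     for chip, week in chips_usage.items():
--         if week is None:
--             continue
--         if chip in ("wildcard1", "wildcard2", "free_hit"):
--             for w in range(week - gap, week + gap + 1):
--                 excluded.add(w)
--         else:
--             excluded.add(week)
--     return excluded
--
-- def get_candidate_weeks(chips_usage, start, end, expanded, skip_first_week):
--     gap = 3 if expanded else 0
--     candidate_weeks = []
--     while gap >= 0: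
--         excluded = get_excluded_weeks(chips_usage, gap=gap)
--         excluded.add(start) if skip_first_week else None
--         candidate_weeks = [w for w in range(start, end + 1) if w not in excluded]
--         if len(candidate_weeks) > 0:
--             return candidate_weeks
--         gap -= 1
--     assert len(candidate_weeks) > 0, "No candidate weeks available"
-- ===== SOURCE B (Python) =====
-- def get_candidate_weeks(chips_usage, start, end, expanded, skip_first_week):
--     gap0 = 3 if expanded else 0
--     wildcards = []
--     exact = set()
--     for chip, week in chips_usage.items():
--         if week is None:
--             continue
--         if chip in ("wildcard1", "wildcard2", "free_hit"):
--             wildcards.append(week)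
--         else:
--             exact.add(week)
--     if skip_first_week:
--         exact.add(start)
--
--     def clearance(w):
--         # distance to the nearest wildcard week, capped at gap0 + 1
--         c = gap0 + 1
--         for x in wildcards:
--             c = min(c, abs(w - x))
--         return c
--
--     best = 0
--     for w in range(start, end + 1):
--         if w not in exact:
--             best = max(best, clearance(w))
--     assert best > 0, "No candidate weeks available"
--     g = min(gap0, best - 1)
--     return [w for w in range(start, end + 1) if w not in exact and clearance(w) > g]
-- ===== Notes on version B (the rewrite author's own statement) =====
-- stated objective: alternative
-- what changed: B has no descending gap loop at all: one pass splits chips_usage into wildcard weeks and an exact-excluded set, one pass computes best = the maximum capped distance-to-nearest-wildcard over admissible weeks, the winning gap is derived arithmetically as min(gap0, best-1), and a single filter produces the result; same AssertionError when best is 0.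
-- outside the precondition, e.g. on get_candidate_weeks({'bench_boost': 5}, 5, 5, False, False): A raises AssertionError, B raises AssertionError
import Mathlib
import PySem

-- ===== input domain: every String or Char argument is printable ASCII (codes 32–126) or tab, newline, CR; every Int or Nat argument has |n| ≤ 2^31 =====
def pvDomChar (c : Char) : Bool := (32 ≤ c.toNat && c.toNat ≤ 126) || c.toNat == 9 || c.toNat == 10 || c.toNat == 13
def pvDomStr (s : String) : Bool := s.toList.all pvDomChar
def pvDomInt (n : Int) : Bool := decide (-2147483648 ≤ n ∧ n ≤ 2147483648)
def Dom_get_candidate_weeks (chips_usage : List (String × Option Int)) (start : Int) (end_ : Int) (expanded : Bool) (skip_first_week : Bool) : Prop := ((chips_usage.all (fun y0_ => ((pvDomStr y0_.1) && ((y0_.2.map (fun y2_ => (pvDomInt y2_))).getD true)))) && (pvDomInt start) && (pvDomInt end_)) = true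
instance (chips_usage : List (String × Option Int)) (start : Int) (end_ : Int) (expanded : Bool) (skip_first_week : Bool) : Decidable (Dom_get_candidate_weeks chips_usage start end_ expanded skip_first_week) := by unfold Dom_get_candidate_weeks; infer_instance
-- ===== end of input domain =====

-- B replaces A's descending gap loop entirely: one pass computes each week's capped distance to the
-- nearest wildcard week, the winning gap is derived arithmetically as min(gap0, best-1), then one filter.


-- ===== PORT A =====
-- get_excluded_weeks: fold over the dict's items; wildcard chips add the whole window week-gap..week+gap.
def get_excluded_weeks (chips_usage : List (String × Option Int)) (gap : Int) : PySem.Set Int :=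
  (PySem.Dict.ofList chips_usage).items.foldl
    (fun excluded p =>
      match p.2 with
      | none => excluded
      | some week =>
        if p.1 == "wildcard1" || p.1 == "wildcard2" || p.1 == "free_hit" then
          (PySem.List.pyRange (week - gap) (week + gap + 1) 1).foldl
            (fun excluded w => PySem.Set.add excluded w) excluded
        else PySem.Set.add excluded week)
    PySem.Set.empty

-- candidate list for one iteration of the 'while gap >= 0' loop
def gcw_candsA (chips_usage : List (String × Option Int)) (start end_ : Int) (skip_first_week : Bool) (gap : Int) : List Int :=
  let excluded := get_excluded_weeks chips_usage gap
  let excluded := if skip_first_week then PySem.Set.add excluded start else excluded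
  (PySem.List.pyRange start (end_ + 1) 1).filter (fun w => !(PySem.Set.contains excluded w))

-- the 'while gap >= 0' loop, gap decremented to 0; the fall-through (Python: AssertionError) yields []
def gcw_loopA (chips_usage : List (String × Option Int)) (start end_ : Int) (skip_first_week : Bool) : Nat → List Int
  | 0 =>
    let candidate_weeks := gcw_candsA chips_usage start end_ skip_first_week 0
    if candidate_weeks.length > 0 then candidate_weeks else []
  | g + 1 =>
    let candidate_weeks := gcw_candsA chips_usage start end_ skip_first_week ((g : Int) + 1)
    if candidate_weeks.length > 0 then candidate_weeks
    else gcw_loopA chips_usage start end_ skip_first_week g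

def get_candidate_weeks (chips_usage : List (String × Option Int)) (start : Int) (end_ : Int) (expanded : Bool) (skip_first_week : Bool) : List Int :=
  gcw_loopA chips_usage start end_ skip_first_week (if expanded then 3 else 0)

-- ===== PORT B =====
-- one scan over the dict's items: (wildcard-week list, exact-excluded set)
def gcw_collect (chips_usage : List (String × Option Int)) : List Int × PySem.Set Int :=
  (PySem.Dict.ofList chips_usage).items.foldl
    (fun (acc : List Int × PySem.Set Int) p =>
      match p.2 with
      | none => acc
      | some week =>
        if p.1 == "wildcard1" || p.1 == "wildcard2" || p.1 == "free_hit" then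
          (acc.1 ++ [week], acc.2)
        else (acc.1, PySem.Set.add acc.2 week))
    ([], PySem.Set.empty)

-- clearance(w): distance to the nearest wildcard week, capped at gap0 + 1
def gcw_clearance (gap0 : Int) (wildcards : List Int) (w : Int) : Int :=
  wildcards.foldl (fun c x => min c |w - x|) (gap0 + 1)

-- the assert (Python: AssertionError when best = 0) yields [] here; those inputs are outside Pre_
def get_candidate_weeks_alt (chips_usage : List (String × Option Int)) (start : Int) (end_ : Int) (expanded : Bool) (skip_first_week : Bool) : List Int :=
  let gap0 : Int := if expanded then 3 else 0
  let acc := gcw_collect chips_usage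
  let exact := if skip_first_week then PySem.Set.add acc.2 start else acc.2
  let best := (PySem.List.pyRange start (end_ + 1) 1).foldl
    (fun b w => if !(PySem.Set.contains exact w) then max b (gcw_clearance gap0 acc.1 w) else b) 0
  if best > 0 then
    let g := min gap0 (best - 1)
    (PySem.List.pyRange start (end_ + 1) 1).filter
      (fun w => !(PySem.Set.contains exact w) && decide (g < gcw_clearance gap0 acc.1 w))
  else []

-- ===== PRECONDITION & SPEC =====
-- Pre_ excludes exactly the inputs on which Python A raises AssertionError (every gap leaves no candidate
-- week; equivalently already at gap 0 every week of start..end is a used chip week or the skipped start);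
-- Python B raises the same AssertionError there.
def Pre_get_candidate_weeks (chips_usage : List (String × Option Int)) (start : Int) (end_ : Int) (expanded : Bool) (skip_first_week : Bool) : Prop :=
  ((chips_usage.length : Int) + 1 < end_ + 1 - start) ∨   -- pigeonhole short-circuit: more weeks than possibly-excluded values (equivalent, keeps the instance computable on wide ranges)
  ∃ w ∈ PySem.List.pyRange start (end_ + 1) 1,
    (¬ ∃ p ∈ (PySem.Dict.ofList chips_usage).items, p.2 = some w) ∧
    (skip_first_week = true → w ≠ start)
instance (chips_usage : List (String × Option Int)) (start : Int) (end_ : Int) (expanded : Bool) (skip_first_week : Bool) : Decidable (Pre_get_candidate_weeks chips_usage start end_ expanded skip_first_week) := by unfold Pre_get_candidate_weeks; infer_instance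

def pvWitness_get_candidate_weeks : (List (String × Option Int)) × Int × Int × Bool × Bool :=
  ([("wildcard1", some 5), ("bench_boost", some 2)], 1, 4, true, true)

def Spec_get_candidate_weeks (chips_usage : List (String × Option Int)) (start : Int) (end_ : Int) (expanded : Bool) (skip_first_week : Bool) (out : List Int) : Prop := out = get_candidate_weeks_alt chips_usage start end_ expanded skip_first_week
instance (chips_usage : List (String × Option Int)) (start : Int) (end_ : Int) (expanded : Bool) (skip_first_week : Bool) (out : List Int) : Decidable (Spec_get_candidate_weeks chips_usage start end_ expanded skip_first_week out) := by unfold Spec_get_candidate_weeks; infer_instance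

-- ===== CLAIM (what is proved, stated in full; the proofs are below) =====
def Claim_equal_get_candidate_weeks : Prop := ∀ (chips_usage : List (String × Option Int)) (start : Int) (end_ : Int) (expanded : Bool) (skip_first_week : Bool), Dom_get_candidate_weeks chips_usage start end_ expanded skip_first_week → Pre_get_candidate_weeks chips_usage start end_ expanded skip_first_week → Spec_get_candidate_weeks chips_usage start end_ expanded skip_first_week (get_candidate_weeks chips_usage start end_ expanded skip_first_week)

-- ===== LEMMAS AND PROOFS =====

-- membership invariant between A's folded excluded set and B's (wildcard list, exact set) pair
lemma gcw_fold_mem (items : List (String × Option Int)) (gap : Int)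
    (s : PySem.Set Int) (wl : List Int) (t : PySem.Set Int) (w : Int)
    (h : w ∈ s ↔ w ∈ t ∨ ∃ x ∈ wl, |w - x| ≤ gap) :
    (w ∈ items.foldl
        (fun excluded p =>
          match p.2 with
          | none => excluded
          | some week =>
            if p.1 == "wildcard1" || p.1 == "wildcard2" || p.1 == "free_hit" then
              (PySem.List.pyRange (week - gap) (week + gap + 1) 1).foldl
                (fun excluded w => PySem.Set.add excluded w) excluded
            else PySem.Set.add excluded week) s) ↔
    (w ∈ (items.foldl
        (fun (acc : List Int × PySem.Set Int) p =>
          match p.2 with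
          | none => acc
          | some week =>
            if p.1 == "wildcard1" || p.1 == "wildcard2" || p.1 == "free_hit" then
              (acc.1 ++ [week], acc.2)
            else (acc.1, PySem.Set.add acc.2 week)) (wl, t)).2 ∨
      ∃ x ∈ (items.foldl
        (fun (acc : List Int × PySem.Set Int) p =>
          match p.2 with
          | none => acc
          | some week =>
            if p.1 == "wildcard1" || p.1 == "wildcard2" || p.1 == "free_hit" then
              (acc.1 ++ [week], acc.2)
            else (acc.1, PySem.Set.add acc.2 week)) (wl, t)).1, |w - x| ≤ gap) := by
  induction items generalizing s wl t with
  | nil => simpa using h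
  | cons p rest ih =>
    simp only [List.foldl_cons]
    match hp : p.2 with
    | none => exact ih s wl t h
    | some week =>
      by_cases hc : (p.1 == "wildcard1" || p.1 == "wildcard2" || p.1 == "free_hit") = true
      · simp only [hc, if_pos]
        apply ih
        rw [show List.foldl (fun (excluded : PySem.Set Int) w => PySem.Set.add excluded w) s
              (PySem.List.pyRange (week - gap) (week + gap + 1) 1) =
            PySem.Set.update s (PySem.List.pyRange (week - gap) (week + gap + 1) 1) from rfl,
          PySem.Set.mem_update]
        constructor
        · rintro (hs | hb)
          · rcases h.1 hs with ht | ⟨x, hx, hd⟩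
            · exact Or.inl ht
            · exact Or.inr ⟨x, List.mem_append_left _ hx, hd⟩
          · refine Or.inr ⟨week, List.mem_append_right _ (by simp), ?_⟩
            rw [PySem.List.mem_pyRange_one] at hb
            rw [abs_le]
            omega
        · rintro (ht | ⟨x, hx, hd⟩)
          · exact Or.inl (h.2 (Or.inl ht))
          · rcases List.mem_append.1 hx with hx | hx
            · exact Or.inl (h.2 (Or.inr ⟨x, hx, hd⟩))
            · simp only [List.mem_singleton] at hx
              subst hx
              refine Or.inr ?_
              rw [PySem.List.mem_pyRange_one]
              rw [abs_le] at hd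
              omega
      · simp only [hc, if_neg, Bool.not_eq_true]
        apply ih
        rw [PySem.Set.mem_add]
        constructor
        · rintro (hs | rfl)
          · rcases h.1 hs with ht | hw
            · exact Or.inl (by rw [PySem.Set.mem_add]; exact Or.inl ht)
            · exact Or.inr hw
          · exact Or.inl (by rw [PySem.Set.mem_add]; exact Or.inr rfl)
        · rintro (ht | hw)
          · rw [PySem.Set.mem_add] at ht
            rcases ht with ht | rfl
            · exact Or.inl (h.2 (Or.inl ht))
            · exact Or.inr rfl
          · exact Or.inl (h.2 (Or.inr hw))

-- the folded excluded set of A, characterized by B's (wildcard list, exact set)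
lemma gcw_excluded_mem (chips_usage : List (String × Option Int)) (gap : Int) (w : Int) :
    w ∈ get_excluded_weeks chips_usage gap ↔
    w ∈ (gcw_collect chips_usage).2 ∨
      ∃ x ∈ (gcw_collect chips_usage).1, |w - x| ≤ gap := by
  have key := gcw_fold_mem ((PySem.Dict.ofList chips_usage).items) gap
      PySem.Set.empty [] PySem.Set.empty w (by simp [PySem.Set.empty])
  simpa [get_excluded_weeks, gcw_collect] using key

-- clearance is the capped minimal distance: g < clearance ↔ g beats every wildcard distance (for g ≤ gap0)
lemma gcw_lt_foldl_min (wl : List Int) (w g c : Int) :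
    g < wl.foldl (fun c x => min c |w - x|) c ↔ g < c ∧ ∀ x ∈ wl, g < |w - x| := by
  induction wl generalizing c with
  | nil => simp
  | cons a l ih =>
    simp only [List.foldl_cons, ih, lt_min_iff, List.mem_cons, forall_eq_or_imp]
    tauto

lemma gcw_lt_clearance (gap0 : Int) (wl : List Int) (w g : Int) (hg : g ≤ gap0) :
    g < gcw_clearance gap0 wl w ↔ ∀ x ∈ wl, g < |w - x| := by
  unfold gcw_clearance
  rw [gcw_lt_foldl_min]
  constructor
  · exact fun h => h.2
  · exact fun h => ⟨by omega, h⟩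

-- A's candidate list at gap g equals B's clearance-based filter (for 0 ≤ g ≤ gap0)
lemma gcw_candsA_eq (chips_usage : List (String × Option Int)) (start end_ : Int)
    (skip_first_week : Bool) (gap0 g : Int) (hg : g ≤ gap0) :
    gcw_candsA chips_usage start end_ skip_first_week g =
    (PySem.List.pyRange start (end_ + 1) 1).filter
      (fun w => !(PySem.Set.contains
          (if skip_first_week then PySem.Set.add (gcw_collect chips_usage).2 start
           else (gcw_collect chips_usage).2) w) &&
        decide (g < gcw_clearance gap0 (gcw_collect chips_usage).1 w)) := by
  unfold gcw_candsA
  refine List.filter_congr ?_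
  intro w _
  set exact := (if skip_first_week then PySem.Set.add (gcw_collect chips_usage).2 start
      else (gcw_collect chips_usage).2) with hexact
  have hmem : w ∈ (if skip_first_week then
        PySem.Set.add (get_excluded_weeks chips_usage g) start
      else get_excluded_weeks chips_usage g) ↔
      w ∈ exact ∨ ∃ x ∈ (gcw_collect chips_usage).1, |w - x| ≤ g := by
    cases skip_first_week
    · simpa [hexact] using gcw_excluded_mem chips_usage g w
    · rw [hexact, if_pos rfl, if_pos rfl, PySem.Set.mem_add, PySem.Set.mem_add,
        gcw_excluded_mem chips_usage g w]
      exact or_right_comm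
  have hnot : ∀ (s : PySem.Set Int), ((!(PySem.Set.contains s w)) = true) ↔ w ∉ s := by
    intro s
    rw [Bool.not_eq_true', Bool.eq_false_iff, Ne, PySem.Set.contains_iff]
  rw [Bool.eq_iff_iff, hnot]
  simp only [Bool.and_eq_true, hnot, decide_eq_true_eq, hmem,
    gcw_lt_clearance gap0 _ w g hg]
  constructor
  · intro h
    refine ⟨fun hx => h (Or.inl hx), fun x hx => ?_⟩
    by_contra hc
    exact h (Or.inr ⟨x, hx, by omega⟩)
  · rintro ⟨h1, h2⟩ (hx | ⟨x, hx, hd⟩)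
    · exact h1 hx
    · exact absurd hd (by have := h2 x hx; omega)

-- the best fold: g < best ↔ g < 0 ∨ some admissible week has clearance above g
lemma gcw_lt_foldl_max (l : List Int) (cond : Int → Bool) (f : Int → Int) (b g : Int) :
    g < l.foldl (fun b w => if cond w then max b (f w) else b) b ↔
    g < b ∨ ∃ w ∈ l, cond w = true ∧ g < f w := by
  induction l generalizing b with
  | nil => simp
  | cons a l ih =>
    simp only [List.foldl_cons, List.mem_cons]
    by_cases hc : cond a = true
    · rw [if_pos hc, ih, lt_max_iff]
      constructor
      · rintro ((h | h) | ⟨w, hw, hcw, hgw⟩)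
        · exact Or.inl h
        · exact Or.inr ⟨a, Or.inl rfl, hc, h⟩
        · exact Or.inr ⟨w, Or.inr hw, hcw, hgw⟩
      · rintro (h | ⟨w, hw | hw, hcw, hgw⟩)
        · exact Or.inl (Or.inl h)
        · subst hw; exact Or.inl (Or.inr hgw)
        · exact Or.inr ⟨w, hw, hcw, hgw⟩
    · rw [if_neg hc, ih]
      constructor
      · rintro (h | ⟨w, hw, hcw, hgw⟩)
        · exact Or.inl h
        · exact Or.inr ⟨w, Or.inr hw, hcw, hgw⟩
      · rintro (h | ⟨w, hw | hw, hcw, hgw⟩)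
        · exact Or.inl h
        · subst hw; exact absurd hcw hc
        · exact Or.inr ⟨w, hw, hcw, hgw⟩

-- a filtered list is nonempty iff some element passes
lemma gcw_filter_pos (l : List Int) (p : Int → Bool) :
    (l.filter p).length > 0 ↔ ∃ w ∈ l, p w = true := by
  simp only [gt_iff_lt, List.length_pos_iff, Ne, List.filter_eq_nil_iff]
  constructor
  · intro h
    by_contra hc
    exact h (fun w hw => fun hp => hc ⟨w, hw, hp⟩)
  · rintro ⟨w, hw, hp⟩ hall
    exact hall w hw hp

-- the descending gap loop of A collapses to B's single filter at gap min(g, best-1)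
lemma gcw_loopA_eq (chips_usage : List (String × Option Int)) (start end_ : Int)
    (skip_first_week : Bool) (gap0 : Int) (g : Nat) (hg : (g : Int) ≤ gap0) :
    gcw_loopA chips_usage start end_ skip_first_week g =
    (let exact := if skip_first_week then PySem.Set.add (gcw_collect chips_usage).2 start
        else (gcw_collect chips_usage).2
     let best := (PySem.List.pyRange start (end_ + 1) 1).foldl
        (fun b w => if !(PySem.Set.contains exact w) then
            max b (gcw_clearance gap0 (gcw_collect chips_usage).1 w) else b) 0
     if best > 0 then
       (PySem.List.pyRange start (end_ + 1) 1).filter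
         (fun w => !(PySem.Set.contains exact w) &&
           decide (min (g : Int) (best - 1) < gcw_clearance gap0 (gcw_collect chips_usage).1 w))
     else []) := by
  set exact := (if skip_first_week then PySem.Set.add (gcw_collect chips_usage).2 start
      else (gcw_collect chips_usage).2)
  set wl := (gcw_collect chips_usage).1
  set best := (PySem.List.pyRange start (end_ + 1) 1).foldl
      (fun b w => if !(PySem.Set.contains exact w) then
          max b (gcw_clearance gap0 wl w) else b) 0 with hbest
  have hlt : ∀ q : Int, 0 ≤ q → (q < best ↔
      ∃ w ∈ PySem.List.pyRange start (end_ + 1) 1,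
        (!(PySem.Set.contains exact w)) = true ∧ q < gcw_clearance gap0 wl w) := by
    intro q hq0
    rw [hbest, gcw_lt_foldl_max]
    constructor
    · rintro (h | h)
      · omega
      · exact h
    · exact fun h => Or.inr h
  have hnonempty : ∀ q : Int, 0 ≤ q → q ≤ gap0 →
      ((gcw_candsA chips_usage start end_ skip_first_week q).length > 0 ↔ q < best) := by
    intro q hq0 hq
    rw [gcw_candsA_eq chips_usage start end_ skip_first_week gap0 q hq, gcw_filter_pos, hlt q hq0]
    simp only [Bool.and_eq_true, decide_eq_true_eq]
    rfl
  induction g with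
  | zero =>
    simp only [gcw_loopA]
    by_cases h0 : (gcw_candsA chips_usage start end_ skip_first_week 0).length > 0
    · rw [if_pos h0]
      have hb : 0 < best := (hnonempty 0 (by norm_num) hg).1 h0
      rw [if_pos hb]
      have hmin : min ((0 : Nat) : Int) (best - 1) = 0 := by omega
      rw [hmin]
      exact gcw_candsA_eq chips_usage start end_ skip_first_week gap0 0 hg
    · rw [if_neg h0]
      have hb : ¬ (0 < best) := fun hb => h0 ((hnonempty 0 (by norm_num) hg).2 hb)
      rw [if_neg hb]
  | succ n ih =>
    have hg' : ((n : Int) + 1) ≤ gap0 := by push_cast at hg; omega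
    simp only [gcw_loopA]
    by_cases hS : (gcw_candsA chips_usage start end_ skip_first_week ((n : Int) + 1)).length > 0
    · rw [if_pos hS]
      have hb : (n : Int) + 1 < best := (hnonempty ((n : Int) + 1) (by positivity) hg').1 hS
      rw [if_pos (by omega)]
      have hmin : min ((n + 1 : Nat) : Int) (best - 1) = (n : Int) + 1 := by push_cast; omega
      rw [hmin]
      exact gcw_candsA_eq chips_usage start end_ skip_first_week gap0 ((n : Int) + 1) hg'
    · rw [if_neg hS]
      have hb : ¬ ((n : Int) + 1 < best) := fun hb => hS ((hnonempty ((n : Int) + 1) (by positivity) hg').2 hb)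
      rw [ih (by push_cast at hg ⊢; omega)]
      by_cases hpos : 0 < best
      · rw [if_pos hpos, if_pos hpos]
        have : min ((n : Nat) : Int) (best - 1) = min ((n + 1 : Nat) : Int) (best - 1) := by
          push_cast; omega
        rw [this]
      · rw [if_neg hpos, if_neg hpos]

-- ===== VERDICT (by name: the statement is the Claim_ definition above) =====
theorem get_candidate_weeks_spec : Claim_equal_get_candidate_weeks := by
  intro chips_usage start end_ expanded skip_first_week _ _
  unfold Spec_get_candidate_weeks get_candidate_weeks get_candidate_weeks_alt
  cases expanded
  · exact gcw_loopA_eq chips_usage start end_ skip_first_week 0 0 (by norm_num)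
  · exact gcw_loopA_eq chips_usage start end_ skip_first_week 3 3 (by norm_num)
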